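-- pv_equiv track=rewrite | github.com/yrapop01/fable | fable/tex.py | join_commands
-- ===== SOURCE A (Python) =====
-- def join_commands(s):
--     prev = ''
--     opt = []
--     req = []
--     for c in s:
--         if len(prev) > 1 and prev[0] == '\\' and prev[1].isalpha():
--             if len(c) >= 2 and c[0] == '{' and c[-1] == '}':
--                 req.append(c)
--                 continue
--             if len(req) == 0 and len(c) >= 2 and c[0] == '[' and c[-1] == ']':
--                 opt.append(c)
--                 continue
--
--             yield [prev] + opt + req
--             prev = c
--             opt = []
--             req = []
--             continue
--
--         if prev:
--             yield [prev]
--         prev = c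
--     if prev:
--         yield [prev] + opt + req
-- ===== SOURCE B (Python) =====
-- def join_commands(s):
--     toks = list(s)
--     i, n = 0, len(toks)
--     while i < n:
--         t = toks[i]
--         if len(t) > 1 and t[0] == '\\' and t[1].isalpha():
--             opt, req = [], []
--             j = i + 1
--             while j < n:
--                 c = toks[j]
--                 if len(c) >= 2 and c[0] == '{' and c[-1] == '}':
--                     req.append(c)
--                     j += 1
--                 elif not req and len(c) >= 2 and c[0] == '[' and c[-1] == ']':
--                     opt.append(c)
--                     j += 1
--                 else:
--                     break
--             yield [t] + opt + req
--             i = j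
--         else:
--             if t:
--                 yield [t]
--             i += 1
-- ===== Notes on version B (the rewrite author's own statement) =====
-- stated objective: alternative
-- what changed: Replaces A's one-token-lookbehind state machine (prev/opt/req carried across a single for-loop) with an outer index loop that classifies the current token directly and an inner loop that consumes its '{...}'/'[...]' argument run before emitting the group.
import Mathlib
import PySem

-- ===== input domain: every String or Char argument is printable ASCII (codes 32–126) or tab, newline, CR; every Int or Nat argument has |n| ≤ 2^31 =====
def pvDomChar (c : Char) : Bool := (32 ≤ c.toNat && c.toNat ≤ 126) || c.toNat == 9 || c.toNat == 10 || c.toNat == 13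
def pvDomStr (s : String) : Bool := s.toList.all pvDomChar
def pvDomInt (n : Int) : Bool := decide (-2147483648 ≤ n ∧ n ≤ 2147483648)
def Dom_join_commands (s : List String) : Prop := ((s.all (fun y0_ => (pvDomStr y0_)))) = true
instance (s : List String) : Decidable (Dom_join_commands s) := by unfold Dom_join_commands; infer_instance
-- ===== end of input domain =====

-- B replaces A's one-token-lookbehind state machine (prev/opt/req threaded through one fold) by a direct
-- outer/inner-loop decomposition: classify the current token, consume its argument run, emit the group.
-- Objective: alternative decomposition, same O(n) cost; both Pythons are generators, materialised here as lists.

-- Python `t[1].isalpha()` restricted to a single char; exact on the printable-ASCII/tab/newline/CR domain.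
def pvIsAlphaCh (c : Char) : Bool := ('a' ≤ c && c ≤ 'z') || ('A' ≤ c && c ≤ 'Z')

-- `len(t) > 1 and t[0] == '\\' and t[1].isalpha()` (indices guarded by the length test; exact).
def pvIsCmdTok (t : String) : Bool :=
  let l := t.toList
  decide (l.length > 1) && (l.getD 0 ' ' == '\\') && pvIsAlphaCh (l.getD 1 ' ')

-- `len(c) >= 2 and c[0] == a and c[-1] == b` (c[-1] = last char, guarded by the length test; exact).
def pvIsBrTok (t : String) (a b : Char) : Bool :=
  let l := t.toList
  decide (l.length ≥ 2) && (l.getD 0 ' ' == a) && (l.getD (l.length - 1) ' ' == b)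

-- ===== PORT A =====
-- A's for-loop over s with state (prev, opt, req); the yields are collected in order.
def joinA_loop : List String → String → List String → List String → List (List String)
  | [], prev, opt, req => if prev ≠ "" then [prev :: (opt ++ req)] else []
  | c :: rest, prev, opt, req =>
    if pvIsCmdTok prev then
      if pvIsBrTok c '{' '}' then joinA_loop rest prev opt (req ++ [c])
      else if req.length == 0 && pvIsBrTok c '[' ']' then joinA_loop rest prev (opt ++ [c]) req
      else (prev :: (opt ++ req)) :: joinA_loop rest c [] []
    else
      (if prev ≠ "" then [[prev]] else []) ++ joinA_loop rest c opt req

def join_commands (s : List String) : List (List String) := joinA_loop s "" [] []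

-- ===== PORT B =====
-- Source B's inner while-loop: starting at index j (= the suffix), append '{…}' tokens to req and — while req
-- is empty — '[…]' tokens to opt, stopping at the first non-argument token; returns (opt, req, rest suffix).
def collectArgs : List String → List String → List String → List String × List String × List String
  | [], opt, req => (opt, req, [])
  | c :: rest, opt, req =>
    if pvIsBrTok c '{' '}' then collectArgs rest opt (req ++ [c])
    else if req.length == 0 && pvIsBrTok c '[' ']' then collectArgs rest (opt ++ [c]) req
    else (opt, req, c :: rest)

theorem collectArgs_len : ∀ (l opt req : List String), (collectArgs l opt req).2.2.length ≤ l.length := by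
  intro l
  induction l with
  | nil => intro _ _; simp [collectArgs]
  | cons c rest ih =>
    intro opt req
    simp only [collectArgs]
    split
    · exact Nat.le_succ_of_le (ih _ _)
    · split
      · exact Nat.le_succ_of_le (ih _ _)
      · simp

-- Source B's outer while-loop over the index i, transcribed as recursion on the remaining suffix toks[i:].
def joinB_loop : List String → List (List String)
  | [] => []
  | t :: rest =>
    if pvIsCmdTok t then
      let p := collectArgs rest [] []
      (t :: (p.1 ++ p.2.1)) :: joinB_loop p.2.2
    else if t ≠ "" then [t] :: joinB_loop rest
    else joinB_loop rest
termination_by l => l.length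
decreasing_by
  · exact Nat.lt_succ_of_le (collectArgs_len rest [] [])
  · simp
  · simp

def join_commands_alt (s : List String) : List (List String) := joinB_loop s

-- ===== PRECONDITION & SPEC =====
def Spec_join_commands (s : List String) (out : List (List String)) : Prop := out = join_commands_alt s
instance (s : List String) (out : List (List String)) : Decidable (Spec_join_commands s out) := by unfold Spec_join_commands; infer_instance

-- ===== CLAIM (what is proved, stated in full; the proofs are below) =====
def Claim_equal_join_commands : Prop := ∀ (s : List String), Dom_join_commands s → Spec_join_commands s (join_commands s)

-- ===== LEMMAS AND PROOFS =====

-- A command token is never empty.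
theorem cmd_ne_empty {t : String} (h : pvIsCmdTok t = true) : t ≠ "" := by
  intro he; subst he; simp [pvIsCmdTok] at h

-- Invariant of A's loop: with opt = req = [] whenever prev is not a command, A's remaining output
-- is the emitted prefix for prev followed by B's output on the remaining tokens.
theorem joinA_eq_joinB : ∀ (s : List String) (prev : String) (opt req : List String),
    (pvIsCmdTok prev = false → opt = [] ∧ req = []) →
    joinA_loop s prev opt req =
      if pvIsCmdTok prev then
        (prev :: ((collectArgs s opt req).1 ++ (collectArgs s opt req).2.1)) ::
          joinB_loop (collectArgs s opt req).2.2
      else (if prev ≠ "" then [[prev]] else []) ++ joinB_loop s := by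
  intro s
  induction s with
  | nil =>
    intro prev opt req h
    by_cases hc : pvIsCmdTok prev = true
    · simp [joinA_loop, collectArgs, joinB_loop, hc, cmd_ne_empty hc]
    · simp only [Bool.not_eq_true] at hc
      obtain ⟨ho, hr⟩ := h hc
      subst ho; subst hr
      simp [joinA_loop, joinB_loop, hc]
  | cons c rest ih =>
    intro prev opt req h
    have key : joinA_loop rest c [] [] = joinB_loop (c :: rest) := by
      rw [ih c [] [] (fun _ => ⟨rfl, rfl⟩)]
      by_cases hcc : pvIsCmdTok c = true
      · rw [if_pos hcc]; simp [joinB_loop, hcc]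
      · simp only [Bool.not_eq_true] at hcc
        rw [if_neg (by simp [hcc])]
        by_cases hne : c = ""
        · subst hne; simp [joinB_loop, hcc]
        · simp [joinB_loop, hcc, hne]
    by_cases hc : pvIsCmdTok prev = true
    · simp only [joinA_loop, hc, if_true]
      by_cases h1 : pvIsBrTok c '{' '}' = true
      · have hca : collectArgs (c :: rest) opt req = collectArgs rest opt (req ++ [c]) := by
          rw [collectArgs, if_pos h1]
        rw [if_pos h1, hca, ih prev opt (req ++ [c]) (fun hf => by rw [hf] at hc; cases hc),
            if_pos hc]
      · rw [if_neg h1]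
        by_cases h2 : (req.length == 0 && pvIsBrTok c '[' ']') = true
        · have hca : collectArgs (c :: rest) opt req = collectArgs rest (opt ++ [c]) req := by
            rw [collectArgs, if_neg h1, if_pos h2]
          rw [if_pos h2, hca, ih prev (opt ++ [c]) req (fun hf => by rw [hf] at hc; cases hc),
              if_pos hc]
        · have hca : collectArgs (c :: rest) opt req = (opt, req, c :: rest) := by
            rw [collectArgs, if_neg h1, if_neg h2]
          rw [if_neg h2, hca, key]
    · simp only [Bool.not_eq_true] at hc
      obtain ⟨ho, hr⟩ := h hc
      subst ho; subst hr
      simp only [joinA_loop, hc, Bool.false_eq_true, if_false]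
      rw [key]

-- ===== VERDICT (by name: the statement is the Claim_ definition above) =====
theorem join_commands_spec : Claim_equal_join_commands := by
  intro s _
  unfold Spec_join_commands join_commands join_commands_alt
  rw [joinA_eq_joinB s "" [] [] (fun _ => ⟨rfl, rfl⟩)]
  simp [pvIsCmdTok]
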